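-- pv_equiv track=rewrite | github.com/JayRathod341997/Applied-AI | gen-ai-course/11_fine-tuning/04_fine_tuning_projects/fine_tuning_projects/04_ecommerce/src/ecommerce_ft/data.py | _fallback_amazon_samples
-- ===== SOURCE A (Python) =====
-- def _fallback_amazon_samples(max_samples: int) -> list[dict[str, str]]:
--     seed_rows = [
--         {
--             "instruction": "Does this charger support fast charging for Samsung S22?",
--             "input": "Product: 25W USB-C charger. Compatibility notes mention Samsung PPS support.",
--             "output": "Yes, this charger supports Samsung fast charging through PPS for compatible devices like the S22.",
--             "source": "amazon_qa",
--         },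
--         {
--             "instruction": "Is this blender jar dishwasher safe?",
--             "input": "Product details: BPA-free jar; top-rack dishwasher safe.",
--             "output": "Yes, the jar is dishwasher safe on the top rack.",
--             "source": "amazon_qa",
--         },
--         {
--             "instruction": "Will this keyboard work with macOS?",
--             "input": "Product description: Bluetooth keyboard compatible with Windows, macOS, iOS, Android.",
--             "output": "Yes, it works with macOS over Bluetooth. Media key mapping may vary by app.",
--             "source": "amazon_qa",
--         },
--     ]
--     rows: list[dict[str, str]] = []
--     while len(rows) < max_samples:
--         rows.extend(seed_rows)
--     return rows[:max_samples]
-- ===== SOURCE B (Python) =====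
-- def _row(instruction: str, input_: str, output: str) -> dict[str, str]:
--     return {
--         "instruction": instruction,
--         "input": input_,
--         "output": output,
--         "source": "amazon_qa",
--     }
--
--
-- def _fallback_amazon_samples(max_samples: int) -> list[dict[str, str]]:
--     seed_rows = [
--         _row(
--             "Does this charger support fast charging for Samsung S22?",
--             "Product: 25W USB-C charger. Compatibility notes mention Samsung PPS support.",
--             "Yes, this charger supports Samsung fast charging through PPS for compatible devices like the S22.",
--         ),
--         _row(
--             "Is this blender jar dishwasher safe?",
--             "Product details: BPA-free jar; top-rack dishwasher safe.",
--             "Yes, the jar is dishwasher safe on the top rack.",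
--         ),
--         _row(
--             "Will this keyboard work with macOS?",
--             "Product description: Bluetooth keyboard compatible with Windows, macOS, iOS, Android.",
--             "Yes, it works with macOS over Bluetooth. Media key mapping may vary by app.",
--         ),
--     ]
--     if max_samples <= 0:
--         return []
--     q, r = divmod(max_samples, len(seed_rows))
--     return seed_rows * q + seed_rows[:r]
-- ===== Notes on version B (the rewrite author's own statement) =====
-- stated objective: simpler
-- what changed: Replaces the grow-by-whole-seed-blocks while-loop plus slice truncation with closed-form block arithmetic: q, r = divmod(max_samples, 3), returning seed_rows * q plus the first r seed rows, with the seed built through a _row helper instead of repeated dict literals.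
import Mathlib
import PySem

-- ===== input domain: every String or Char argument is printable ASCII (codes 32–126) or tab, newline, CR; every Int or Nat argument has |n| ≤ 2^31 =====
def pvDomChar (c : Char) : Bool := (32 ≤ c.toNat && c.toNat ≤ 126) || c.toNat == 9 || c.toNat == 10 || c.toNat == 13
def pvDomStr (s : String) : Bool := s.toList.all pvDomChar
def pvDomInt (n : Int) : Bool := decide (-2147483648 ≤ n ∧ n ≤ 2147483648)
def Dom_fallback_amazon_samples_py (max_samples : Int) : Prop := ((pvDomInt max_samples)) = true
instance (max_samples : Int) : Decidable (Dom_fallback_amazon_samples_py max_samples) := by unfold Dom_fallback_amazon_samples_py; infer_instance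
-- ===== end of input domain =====

-- B replaces A's grow-by-seed-blocks-then-slice while-loop with closed-form block
-- arithmetic (divmod): q whole copies of the seed plus its first r rows (objective: simpler).

-- ===== PORT A =====
-- A's seed_rows literal: explicit dict literals, as in Source A
def pvSeedRowsA : List (List (String × String)) :=
  [ [("instruction", "Does this charger support fast charging for Samsung S22?"),
     ("input", "Product: 25W USB-C charger. Compatibility notes mention Samsung PPS support."),
     ("output", "Yes, this charger supports Samsung fast charging through PPS for compatible devices like the S22."),
     ("source", "amazon_qa")],
    [("instruction", "Is this blender jar dishwasher safe?"),
     ("input", "Product details: BPA-free jar; top-rack dishwasher safe."),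
     ("output", "Yes, the jar is dishwasher safe on the top rack."),
     ("source", "amazon_qa")],
    [("instruction", "Will this keyboard work with macOS?"),
     ("input", "Product description: Bluetooth keyboard compatible with Windows, macOS, iOS, Android."),
     ("output", "Yes, it works with macOS over Bluetooth. Media key mapping may vary by app."),
     ("source", "amazon_qa")] ]

-- length fact used by the loop's termination argument
lemma pvSeedRowsA_length : pvSeedRowsA.length = 3 := rfl

-- A's while-loop: while len(rows) < max_samples: rows.extend(seed_rows)
def pvLoopA (m : Int) (rows : List (List (String × String))) : List (List (String × String)) :=
  if (rows.length : Int) < m then pvLoopA m (rows ++ pvSeedRowsA) else rows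
termination_by (m - rows.length).toNat
decreasing_by simp [List.length_append, pvSeedRowsA_length]; omega

def fallback_amazon_samples_py (max_samples : Int) : List (List (String × String)) :=
  PySem.List.slice (pvLoopA max_samples []) none (some max_samples)   -- rows[:max_samples]

-- ===== PORT B =====
-- B's _row helper: dict with the three fields plus the fixed "source" entry
def pvRow (instruction input_ output : String) : List (String × String) :=
  [("instruction", instruction), ("input", input_), ("output", output), ("source", "amazon_qa")]

-- B's seed_rows, built through the _row helper as in Source B
def pvSeedRowsB : List (List (String × String)) :=
  [ pvRow "Does this charger support fast charging for Samsung S22?"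
          "Product: 25W USB-C charger. Compatibility notes mention Samsung PPS support."
          "Yes, this charger supports Samsung fast charging through PPS for compatible devices like the S22.",
    pvRow "Is this blender jar dishwasher safe?"
          "Product details: BPA-free jar; top-rack dishwasher safe."
          "Yes, the jar is dishwasher safe on the top rack.",
    pvRow "Will this keyboard work with macOS?"
          "Product description: Bluetooth keyboard compatible with Windows, macOS, iOS, Android."
          "Yes, it works with macOS over Bluetooth. Media key mapping may vary by app." ]

-- if max_samples <= 0: return []; q, r = divmod(max_samples, 3); return seed_rows * q + seed_rows[:r]
def fallback_amazon_samples_py_alt (max_samples : Int) : List (List (String × String)) :=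
  if max_samples ≤ 0 then []
  else
    let q := PySem.Int.floordiv max_samples (pvSeedRowsB.length : Int)
    let r := PySem.Int.mod max_samples (pvSeedRowsB.length : Int)
    (List.replicate q.toNat pvSeedRowsB).flatten ++ PySem.List.slice pvSeedRowsB none (some r)

-- ===== PRECONDITION & SPEC =====
def Spec_fallback_amazon_samples_py (max_samples : Int) (out : List (List (String × String))) : Prop := out = fallback_amazon_samples_py_alt max_samples
instance (max_samples : Int) (out : List (List (String × String))) : Decidable (Spec_fallback_amazon_samples_py max_samples out) := by unfold Spec_fallback_amazon_samples_py; infer_instance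

-- ===== CLAIM =====
def Claim_equal_fallback_amazon_samples_py : Prop := ∀ (max_samples : Int), Dom_fallback_amazon_samples_py max_samples → Spec_fallback_amazon_samples_py max_samples (fallback_amazon_samples_py max_samples)

-- ===== LEMMAS AND PROOFS =====

lemma pvSeed_eq : pvSeedRowsB = pvSeedRowsA := rfl

-- A's loop, starting from a list of length a multiple of 3, produces full blocks:
-- truncated to m it equals q full seeds plus the first r rows.
lemma pvFlatten_replicate_append (q : Nat) :
    (List.replicate (q + 1) pvSeedRowsA).flatten
      = (List.replicate q pvSeedRowsA).flatten ++ pvSeedRowsA := by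
  induction q with
  | zero => simp
  | succ q ih => simpa [List.replicate_succ, List.flatten_cons] using congrArg (pvSeedRowsA ++ ·) ih

lemma pvLoopA_eq_flatten (m : Int) : ∀ (d k : Nat),
    (m - 3 * k).toNat ≤ d →
    pvLoopA m (List.replicate k pvSeedRowsA).flatten
      = (List.replicate (max k ((m + 2).toNat / 3)) pvSeedRowsA).flatten := by
  intro d
  induction d with
  | zero =>
    intro k hd
    have hlen : ((List.replicate k pvSeedRowsA).flatten).length = 3 * k := by
      simp [pvSeedRowsA, Nat.mul_comm]
    rw [pvLoopA, if_neg (by rw [hlen]; omega)]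
    have : max k ((m + 2).toNat / 3) = k := by omega
    rw [this]
  | succ d ih =>
    intro k hd
    have hlen : ((List.replicate k pvSeedRowsA).flatten).length = 3 * k := by
      simp [pvSeedRowsA, Nat.mul_comm]
    by_cases hlt : ((List.replicate k pvSeedRowsA).flatten.length : Int) < m
    · rw [pvLoopA, if_pos hlt]
      rw [← pvFlatten_replicate_append k]
      have hmaxeq : max (k + 1) ((m + 2).toNat / 3) = max k ((m + 2).toNat / 3) := by
        rw [hlen] at hlt; omega
      rw [ih (k + 1) (by rw [hlen] at hlt; omega), hmaxeq]
    · rw [pvLoopA, if_neg hlt]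
      have : max k ((m + 2).toNat / 3) = k := by rw [hlen] at hlt; omega
      rw [this]

lemma pvTake_flatten (q n : Nat) (hn : n ≤ 3 * q) :
    ((List.replicate q pvSeedRowsA).flatten).take n
      = ((List.replicate (n / 3) pvSeedRowsA).flatten) ++ pvSeedRowsA.take (n % 3) := by
  induction q generalizing n with
  | zero =>
    have : n = 0 := by omega
    simp [this]
  | succ q ih =>
    by_cases h3 : n ≤ 3
    · interval_cases n <;> simp [List.replicate_succ, List.flatten_cons, pvSeedRowsA]
    · have hrec := ih (n - 3) (by omega)
      have hd : (n - 3) / 3 = n / 3 - 1 := by omega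
      have hm : (n - 3) % 3 = n % 3 := by omega
      have hq : n / 3 = (n / 3 - 1) + 1 := by omega
      rw [List.replicate_succ, List.flatten_cons,
          List.take_append]
      have hlenA : pvSeedRowsA.length = 3 := rfl
      rw [hlenA, List.take_of_length_le (by omega : pvSeedRowsA.length ≤ n) ]
      rw [hrec, hd, hm, hq, List.replicate_succ, List.flatten_cons]
      simp

-- ===== VERDICT =====
theorem fallback_amazon_samples_py_spec : Claim_equal_fallback_amazon_samples_py := by
  intro m _
  unfold Spec_fallback_amazon_samples_py fallback_amazon_samples_py fallback_amazon_samples_py_alt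
  by_cases hm : m ≤ 0
  · rw [if_pos hm, pvLoopA, if_neg (by simp; omega)]
    simp [PySem.List.slice]
  · rw [if_neg hm]
    have hm0 : 0 ≤ m := by omega
    have hloop := pvLoopA_eq_flatten m (m - 0).toNat 0 (by omega)
    simp only [List.replicate_zero, List.flatten_nil] at hloop
    rw [hloop, PySem.List.slice_to _ hm0]
    have hmax : max 0 ((m + 2).toNat / 3) = (m + 2).toNat / 3 := by omega
    rw [hmax, pvTake_flatten _ _ (by omega)]
    have hlenB : (pvSeedRowsB.length : Int) = 3 := rfl
    rw [hlenB, PySem.Int.floordiv_eq_ediv_of_pos (by norm_num),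
        PySem.Int.mod_eq_emod_of_pos (by norm_num)]
    rw [pvSeed_eq]
    show _ = (List.replicate (m / 3).toNat pvSeedRowsA).flatten ++
        PySem.List.slice pvSeedRowsA none (some (m % 3))
    have h1 : m.toNat / 3 = (m / 3).toNat := by omega
    have h2 : m.toNat % 3 = (m % 3).toNat := by omega
    rw [h1, h2, PySem.List.slice_to _ (by omega)]
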